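-- pv_equiv track=rewrite | github.com/JonP07/HiPER-agent | hiper_hae/hier_mask.py | _find_tag_char_span
-- ===== SOURCE A (Python) =====
-- from typing import Tuple, Optional
--
-- def _find_tag_char_span(text: str, open_tag: str, close_tags: list[str]) -> Optional[Tuple[int, int, int, int]]:
--     s_open = text.find(open_tag)
--     if s_open < 0:
--         return None
--     s_content = s_open + len(open_tag)
--     s_close = None
--     close_len = 0
--     for tag in close_tags:
--         idx = text.find(tag, s_content)
--         if idx >= 0 and (s_close is None or idx < s_close):
--             s_close = idx
--             close_len = len(tag)
--     if s_close is None: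
--         return None
--     return s_open, s_content, s_close, close_len
-- ===== SOURCE B (Python) =====
-- from typing import Tuple, Optional
--
-- def _find_tag_char_span(text: str, open_tag: str, close_tags: list[str]) -> Optional[Tuple[int, int, int, int]]:
--     s_open = text.find(open_tag)
--     if s_open < 0:
--         return None
--     s_content = s_open + len(open_tag)
--     # single left-to-right scan: first position at/after s_content where any
--     # close tag starts; ties at a position go to the earliest-listed tag,
--     # which matches A's strict-min update over per-tag find() results
--     for i in range(s_content, len(text) + 1):
--         for tag in close_tags:
--             if text.startswith(tag, i):
--                 return s_open, s_content, i, len(tag)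
--     return None
-- ===== Notes on version B (the rewrite author's own statement) =====
-- stated objective: alternative
-- what changed: Instead of computing a full find() over the whole text for every close tag and folding a running minimum, B makes one left-to-right scan over positions from s_content and returns at the first position where any close tag starts (earliest-listed tag on ties), so it stops at the earliest match instead of scanning the text once per tag.
import Mathlib
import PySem

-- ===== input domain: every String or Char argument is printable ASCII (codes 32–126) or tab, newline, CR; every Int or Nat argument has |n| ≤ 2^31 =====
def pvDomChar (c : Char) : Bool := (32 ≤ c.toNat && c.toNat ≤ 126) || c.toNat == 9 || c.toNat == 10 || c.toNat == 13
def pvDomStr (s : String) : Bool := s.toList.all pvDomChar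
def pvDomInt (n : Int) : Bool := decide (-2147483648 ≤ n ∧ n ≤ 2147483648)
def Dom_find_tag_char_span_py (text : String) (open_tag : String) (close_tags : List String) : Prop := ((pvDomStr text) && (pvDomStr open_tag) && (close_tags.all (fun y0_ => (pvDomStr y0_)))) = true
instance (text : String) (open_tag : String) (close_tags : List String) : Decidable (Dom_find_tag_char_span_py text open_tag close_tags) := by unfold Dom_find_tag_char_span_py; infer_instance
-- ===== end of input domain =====

-- B replaces A's per-tag full find()+running-minimum fold by a single left-to-right
-- position scan that returns at the earliest close-tag start (alternative algorithm).


-- ===== PORT A =====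
-- A's `for tag in close_tags` loop: state (s_close : Option Int, close_len : Int)
def closeLoop (text : String) (s_content : Int) (tags : List String) : Option Int × Int :=
  tags.foldl (fun (st : Option Int × Int) tag =>
    let idx := PySem.Str.findFrom text tag s_content
    if (decide (0 ≤ idx) && (match st.1 with
        | none => true
        | some c => decide (idx < c))) = true
    then (some idx, PySem.Str.len tag)
    else st) (none, 0)

def find_tag_char_span_py (text : String) (open_tag : String) (close_tags : List String) : Option (Int × Int × Int × Int) :=
  let s_open := PySem.Str.find text open_tag
  if s_open < 0 then none
  else
    let s_content := s_open + PySem.Str.len open_tag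
    match closeLoop text s_content close_tags with
    | (none, _) => none
    | (some s_close, close_len) => some (s_open, s_content, s_close, close_len)

-- ===== PORT B =====
-- text.startswith(tag, i): exact for 0 ≤ i (B only calls it with 0 ≤ i)
def startswithFrom (t : List Char) (tag : List Char) (i : Int) : Bool :=
  tag.isPrefixOf (t.drop i.toNat)

-- B's `for i in range(s_content, len(text)+1)` loop; fuel = number of remaining iterations;
-- the inner `for tag in close_tags: if text.startswith(tag, i): return …` is List.find?
def scanClose (t : List Char) (tags : List String) : Int → Nat → Option (Int × Int)
  | _, 0 => none
  | i, Nat.succ k =>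
    match tags.find? (fun tag => startswithFrom t tag.toList i) with
    | some tag => some (i, PySem.Str.len tag)
    | none => scanClose t tags (i + 1) k

def find_tag_char_span_py_alt (text : String) (open_tag : String) (close_tags : List String) : Option (Int × Int × Int × Int) :=
  let s_open := PySem.Str.find text open_tag
  if s_open < 0 then none
  else
    let s_content := s_open + PySem.Str.len open_tag
    match scanClose text.toList close_tags s_content (text.toList.length + 1 - s_content.toNat) with
    | some (i, l) => some (s_open, s_content, i, l)
    | none => none

-- ===== PRECONDITION & SPEC =====
def Spec_find_tag_char_span_py (text : String) (open_tag : String) (close_tags : List String) (out : Option (Int × Int × Int × Int)) : Prop := out = find_tag_char_span_py_alt text open_tag close_tags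
instance (text : String) (open_tag : String) (close_tags : List String) (out : Option (Int × Int × Int × Int)) : Decidable (Spec_find_tag_char_span_py text open_tag close_tags out) := by unfold Spec_find_tag_char_span_py; infer_instance

-- ===== CLAIM (what is proved, stated in full; the proofs are below) =====
def Claim_equal_find_tag_char_span_py : Prop := ∀ (text : String) (open_tag : String) (close_tags : List String), Dom_find_tag_char_span_py text open_tag close_tags → Spec_find_tag_char_span_py text open_tag close_tags (find_tag_char_span_py text open_tag close_tags)

-- ===== LEMMAS AND PROOFS =====

-- find? respects pointwise-equal predicates (not in the libraries for List.find?)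
lemma find?_congr' {α : Type} (l : List α) (p q : α → Bool) (h : ∀ a ∈ l, p a = q a) :
    l.find? p = l.find? q := by
  induction l with
  | nil => rfl
  | cons a l ih =>
    rw [List.find?_cons, List.find?_cons, h a (List.mem_cons_self ..)]
    cases hq : q a
    · exact ih fun b hb => h b (List.mem_cons_of_mem _ hb)
    · rfl

-- abbreviation used only in the proofs: the findFrom value A computes for a tag
def fv (text : String) (s_content : Int) (tag : String) : Int :=
  PySem.Str.findFrom text tag s_content

-- A's loop body as a named function (proof-side only)
def stepA (text : String) (sc : Int) (st : Option Int × Int) (tag : String) : Option Int × Int :=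
  let idx := fv text sc tag
  if (decide (0 ≤ idx) && (match st.1 with
      | none => true
      | some c => decide (idx < c))) = true
  then (some idx, PySem.Str.len tag)
  else st

lemma closeLoop_eq (text : String) (sc : Int) (tags : List String) :
    closeLoop text sc tags = tags.foldl (stepA text sc) (none, 0) := rfl

lemma closeLoop_append (text : String) (sc : Int) (l : List String) (tag : String) :
    closeLoop text sc (l ++ [tag]) = stepA text sc (closeLoop text sc l) tag := by
  rw [closeLoop_eq, closeLoop_eq, List.foldl_append, List.foldl_cons, List.foldl_nil]

-- characterization of A's fold: none together with "no tag found", or the running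
-- minimum m with the first-listed tag attaining it
lemma closeLoop_spec (text : String) (sc : Int) (tags : List String) :
    (closeLoop text sc tags = (none, 0) ∧ ∀ tag ∈ tags, fv text sc tag < 0)
    ∨ (∃ m tag₀, 0 ≤ m ∧
        closeLoop text sc tags = (some m, PySem.Str.len tag₀) ∧
        tags.find? (fun tg => decide (fv text sc tg = m)) = some tag₀ ∧
        ∀ tag ∈ tags, 0 ≤ fv text sc tag → m ≤ fv text sc tag) := by
  induction tags using List.reverseRecOn with
  | nil => exact Or.inl ⟨rfl, by simp⟩
  | append_singleton l tag ih =>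
    rw [closeLoop_append]
    rcases ih with ⟨hr, hall⟩ | ⟨m, tag₀, hm0, hr, hf, hmin⟩
    · rw [hr]
      by_cases h0 : 0 ≤ fv text sc tag
      · right
        refine ⟨fv text sc tag, tag, h0, by simp [stepA, h0], ?_, ?_⟩
        · rw [List.find?_append]
          have h1 : l.find? (fun tg => decide (fv text sc tg = fv text sc tag)) = none :=
            List.find?_eq_none.mpr fun tg htg => by
              have := hall tg htg; simp; omega
          simp [h1]
        · intro tag' htag'
          rcases List.mem_append.mp htag' with h | h
          · exact fun h0' => absurd (hall tag' h) (not_lt.mpr h0')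
          · rw [List.mem_singleton.mp h]; exact fun _ => le_refl _
      · left
        refine ⟨by simp [stepA, h0], ?_⟩
        intro tag' htag'
        rcases List.mem_append.mp htag' with h | h
        · exact hall tag' h
        · rw [List.mem_singleton.mp h]; omega
    · rw [hr]
      by_cases h0 : 0 ≤ fv text sc tag ∧ fv text sc tag < m
      · right
        refine ⟨fv text sc tag, tag, h0.1, by simp [stepA, h0.1, h0.2], ?_, ?_⟩
        · rw [List.find?_append]
          have h1 : l.find? (fun tg => decide (fv text sc tg = fv text sc tag)) = none :=
            List.find?_eq_none.mpr fun tg htg => by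
              simp only [decide_eq_true_eq]
              intro heq
              have h2 := hmin tg htg (heq ▸ h0.1)
              omega
          simp [h1]
        · intro tag' htag'
          rcases List.mem_append.mp htag' with h | h
          · intro h0'
            have := hmin tag' h h0'
            omega
          · rw [List.mem_singleton.mp h]; exact fun _ => le_refl _
      · right
        have hcond : (decide (0 ≤ fv text sc tag) && decide (fv text sc tag < m)) = false := by
          rcases not_and_or.mp h0 with h | h <;> simp [h]
        refine ⟨m, tag₀, hm0, by simp [stepA, hcond], ?_, ?_⟩
        · rw [List.find?_append, hf]; rfl
        · intro tag' htag'
          rcases List.mem_append.mp htag' with h | h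
          · exact hmin tag' h
          · rw [List.mem_singleton.mp h]
            intro h0'
            rcases not_and_or.mp h0 with h | h
            · exact absurd h0' h
            · omega

-- B's scan returns none when no position in range matches
lemma scanClose_of_forall_none (t : List Char) (tags : List String) (k : Nat) (i0 : Int)
    (h : ∀ j : Nat, j < k → tags.find? (fun tag => startswithFrom t tag.toList (i0 + j)) = none) :
    scanClose t tags i0 k = none := by
  induction k generalizing i0 with
  | zero => rfl
  | succ k ih =>
    have h0 := h 0 (Nat.succ_pos k)
    simp only [Nat.cast_zero, add_zero] at h0
    rw [scanClose, h0]
    apply ih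
    intro j hj
    have hj1 := h (j + 1) (by omega)
    have : i0 + ((j : Nat) + 1 : Nat) = i0 + 1 + (j : Nat) := by push_cast; ring
    rwa [this] at hj1

-- B's scan returns the first matching position (earliest-listed tag there)
lemma scanClose_of_first (t : List Char) (tags : List String) (k : Nat) (i0 : Int)
    (j : Nat) (tag : String) (hj : j < k)
    (hpre : ∀ j' : Nat, j' < j → tags.find? (fun tg => startswithFrom t tg.toList (i0 + j')) = none)
    (hhit : tags.find? (fun tg => startswithFrom t tg.toList (i0 + j)) = some tag) :
    scanClose t tags i0 k = some (i0 + j, PySem.Str.len tag) := by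
  induction k generalizing i0 j with
  | zero => omega
  | succ k ih =>
    cases j with
    | zero =>
      simp only [Nat.cast_zero, add_zero] at hhit
      rw [scanClose, hhit]
      simp
    | succ j =>
      have h0 := hpre 0 (Nat.succ_pos j)
      simp only [Nat.cast_zero, add_zero] at h0
      rw [scanClose, h0]
      have hshift : ∀ j' : Nat, i0 + ((j' : Nat) + 1 : Nat) = i0 + 1 + (j' : Nat) := by
        intro j'; push_cast; ring
      have hhit' : tags.find? (fun tg => startswithFrom t tg.toList (i0 + 1 + j)) = some tag := by
        rwa [hshift j] at hhit
      have hpre' : ∀ j' : Nat, j' < j →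
          tags.find? (fun tg => startswithFrom t tg.toList (i0 + 1 + j')) = none := by
        intro j' hj'
        have := hpre (j' + 1) (by omega)
        rwa [hshift j'] at this
      have := ih (i0 + 1) j (by omega) hpre' hhit'
      rw [this, hshift j]

-- a prefix occurrence at position c + j is an infix occurrence in the suffix from c
lemma prefix_drop_infix (tag t : List Char) (c j : Nat) (h : tag <+: t.drop (c + j)) :
    tag <:+: t.drop c := by
  rw [← List.drop_drop] at h
  exact List.infix_iff_prefix_suffix.mpr ⟨(t.drop c).drop j, h, List.drop_suffix j _⟩

-- ===== VERDICT (by name: the statement is the Claim_ definition above) =====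
theorem find_tag_char_span_py_spec : Claim_equal_find_tag_char_span_py := by
  intro text open_tag close_tags _
  unfold Spec_find_tag_char_span_py
  unfold find_tag_char_span_py find_tag_char_span_py_alt
  by_cases hso : PySem.Str.find text open_tag < 0
  · rw [if_pos hso, if_pos hso]
  · simp only [hso, if_false]
    -- notation
    have hfind0 : 0 ≤ PySem.Chars.find text.toList open_tag.toList := by
      rw [PySem.Str.find_eq] at hso; omega
    obtain ⟨hprefix, _⟩ := PySem.Chars.find_spec hfind0
    have hlenle : open_tag.toList.length ≤
        text.toList.length - (PySem.Chars.find text.toList open_tag.toList).toNat := by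
      simpa using hprefix.length_le
    have hfle := PySem.Chars.find_le_length text.toList open_tag.toList
    -- s_content as a natural number c
    set c : Nat := (PySem.Chars.find text.toList open_tag.toList).toNat + open_tag.toList.length
      with hc
    have htn : ((PySem.Chars.find text.toList open_tag.toList).toNat : Int)
        = PySem.Chars.find text.toList open_tag.toList := Int.toNat_of_nonneg hfind0
    have hcn : c ≤ text.toList.length := by omega
    have hsc : PySem.Str.find text open_tag + PySem.Str.len open_tag = (c : Int) := by
      rw [PySem.Str.find_eq, PySem.Str.len_eq, hc]; push_cast; omega
    rw [hsc]
    have htoNat : ((c : Int)).toNat = c := Int.toNat_natCast c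
    rw [htoNat]
    -- bridge fv to Chars.findFrom at ↑c
    have hfv : ∀ tag : String, fv text (c : Int) tag
        = PySem.Chars.findFrom text.toList tag.toList (c : Int) := by
      intro tag; rw [fv, PySem.Str.findFrom_eq]
    -- each fv value is -1 or in [c, length]
    have hfvsplit : ∀ tag : String,
        fv text (c : Int) tag = -1 ∨
        ((c : Int) ≤ fv text (c : Int) tag ∧ fv text (c : Int) tag ≤ (text.toList.length : Int)) := by
      intro tag
      rw [hfv tag, PySem.Chars.findFrom_natCast _ _ c hcn]
      by_cases hneg : PySem.Chars.find (text.toList.drop c) tag.toList = -1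
      · left; simp [hneg]
      · right
        have h1 := PySem.Chars.neg_one_le_find (text.toList.drop c) tag.toList
        have h2 := PySem.Chars.find_le_length (text.toList.drop c) tag.toList
        rw [List.length_drop] at h2
        rw [if_neg hneg]
        constructor <;> [omega; (push_cast at h2 ⊢; omega)]
    rcases closeLoop_spec text (c : Int) close_tags with ⟨hr, hall⟩ | ⟨m, tag₀, hm0, hr, hf, hmin⟩
    · -- no close tag anywhere: B's scan also finds nothing
      rw [hr]
      rw [scanClose_of_forall_none text.toList close_tags (text.toList.length + 1 - c) (c : Int) ?_]
      intro j hj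
      apply List.find?_eq_none.mpr
      intro tag htag
      simp only [startswithFrom, Bool.not_eq_true]
      rw [Bool.eq_false_iff]
      intro hpref
      have hpref' : tag.toList <+: text.toList.drop (c + j) := by
        have : ((c : Int) + (j : Nat)).toNat = c + j := by omega
        rw [this] at hpref
        exact List.isPrefixOf_iff_prefix.mp hpref
      have hinf : tag.toList <:+: text.toList.drop c := prefix_drop_infix _ _ _ _ hpref'
      have := hall tag htag
      rcases hfvsplit tag with hneg | ⟨hge, _⟩
      · rw [hfv tag, PySem.Chars.findFrom_natCast_eq_neg_one_iff _ _ c hcn] at hneg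
        exact hneg hinf
      · omega
    · -- close tag found at minimal position m; B's scan stops exactly there
      rw [hr]
      have hfvtag₀ : fv text (c : Int) tag₀ = m := by
        have := List.find?_some hf
        simpa using this
      have htag₀mem : tag₀ ∈ close_tags := List.mem_of_find?_eq_some hf
      have hne : PySem.Chars.findFrom text.toList tag₀.toList (c : Int) ≠ -1 := by
        rw [← hfv tag₀, hfvtag₀]; omega
      obtain ⟨hcm, hprefm, hminpos⟩ := PySem.Chars.findFrom_natCast_spec _ _ c hcn hne
      rw [← hfv tag₀, hfvtag₀] at hcm hprefm hminpos
      have hmle : m ≤ (text.toList.length : Int) := by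
        rcases hfvsplit tag₀ with h | ⟨_, h⟩
        · omega
        · rw [hfvtag₀] at h; exact h
      -- the offset of m from c
      have hmtn : m.toNat = c + (m.toNat - c) := by omega
      set j₀ : Nat := m.toNat - c with hj₀
      have hj₀lt : j₀ < text.toList.length + 1 - c := by omega
      have hcj₀ : (c : Int) + (j₀ : Nat) = m := by omega
      -- at offsets before j₀ nothing matches
      have hpre : ∀ j' : Nat, j' < j₀ →
          close_tags.find? (fun tg => startswithFrom text.toList tg.toList ((c : Int) + j')) = none := by
        intro j' hj'
        apply List.find?_eq_none.mpr
        intro tag htag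
        simp only [startswithFrom, Bool.not_eq_true]
        rw [Bool.eq_false_iff]
        intro hpref
        have hpref' : tag.toList <+: text.toList.drop (c + j') := by
          have : ((c : Int) + (j' : Nat)).toNat = c + j' := by omega
          rw [this] at hpref
          exact List.isPrefixOf_iff_prefix.mp hpref
        have hinf : tag.toList <:+: text.toList.drop c := prefix_drop_infix _ _ _ _ hpref'
        -- tag occurs, so its fv is a position ≥ c, ≤ c + j' by minimality; but m ≤ fv
        have hne' : PySem.Chars.findFrom text.toList tag.toList (c : Int) ≠ -1 := fun heq =>
          (PySem.Chars.findFrom_natCast_eq_neg_one_iff _ _ c hcn).mp heq hinf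
        obtain ⟨hcf, _, hminf⟩ := PySem.Chars.findFrom_natCast_spec _ _ c hcn hne'
        rw [← hfv tag] at hcf hminf
        have hfub : (fv text (c : Int) tag).toNat ≤ c + j' := by
          by_contra hgt
          exact hminf (c + j') (by omega) (by omega) hpref'
        have hmlef := hmin tag htag (by omega)
        omega
      -- at offset j₀ the match predicate agrees with A's "fv = m" predicate
      have hagree : ∀ tag ∈ close_tags,
          startswithFrom text.toList tag.toList ((c : Int) + j₀)
            = decide (fv text (c : Int) tag = m) := by
        intro tag htag
        have htn' : ((c : Int) + (j₀ : Nat)).toNat = m.toNat := by omega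
        by_cases hp : tag.toList <+: text.toList.drop m.toNat
        · have hl : startswithFrom text.toList tag.toList ((c : Int) + j₀) = true := by
            rw [startswithFrom, htn']
            exact List.isPrefixOf_iff_prefix.mpr hp
          have hinf : tag.toList <:+: text.toList.drop c := by
            apply prefix_drop_infix tag.toList text.toList c (m.toNat - c)
            rw [← hmtn]; exact hp
          have hne' : PySem.Chars.findFrom text.toList tag.toList (c : Int) ≠ -1 := fun heq =>
            (PySem.Chars.findFrom_natCast_eq_neg_one_iff _ _ c hcn).mp heq hinf
          obtain ⟨hcf, _, hminf⟩ := PySem.Chars.findFrom_natCast_spec _ _ c hcn hne'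
          rw [← hfv tag] at hcf hminf
          have hfub : (fv text (c : Int) tag).toNat ≤ m.toNat := by
            by_contra hgt
            exact hminf m.toNat (by omega) (by omega) hp
          have hmlef := hmin tag htag (by omega)
          have : fv text (c : Int) tag = m := by omega
          rw [hl]
          symm
          simpa using this
        · have hl : startswithFrom text.toList tag.toList ((c : Int) + j₀) = false := by
            rw [startswithFrom, htn', Bool.eq_false_iff]
            intro hcontra
            exact hp (List.isPrefixOf_iff_prefix.mp hcontra)
          have hne2 : fv text (c : Int) tag ≠ m := by
            intro heq
            apply hp
            rw [← heq]
            rcases hfvsplit tag with h | _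
            · omega
            · have hne' : PySem.Chars.findFrom text.toList tag.toList (c : Int) ≠ -1 := by
                rw [← hfv tag]; omega
              obtain ⟨_, hpf, _⟩ := PySem.Chars.findFrom_natCast_spec _ _ c hcn hne'
              rw [← hfv tag] at hpf
              exact hpf
          rw [hl]
          simp [hne2]
      have hhit : close_tags.find?
          (fun tg => startswithFrom text.toList tg.toList ((c : Int) + j₀)) = some tag₀ := by
        rw [find?_congr' close_tags _ (fun tg => decide (fv text (c : Int) tg = m)) hagree]
        exact hf
      rw [scanClose_of_first text.toList close_tags (text.toList.length + 1 - c) (c : Int)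
        j₀ tag₀ hj₀lt hpre hhit]
      rw [hcj₀]
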